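-- pv_equiv track=rewrite | github.com/LeoZedek/adventofcode | 2023/J12/solution1.py | replace_by_index
-- ===== SOURCE A (Python) =====
-- def replace_by_index(string, index, char):
--
-- 	result = ""
-- 	rank_unknow = 0
--
-- 	for i in range(len(string)):
-- 		if string[i] == "?":
-- 			if rank_unknow in index:
-- 				result += char
-- 			else:
-- 				result += "."
--
-- 			rank_unknow += 1
--
-- 		else:
-- 			result += string[i]
--
-- 	return result
-- ===== SOURCE B (Python) =====
-- def replace_by_index(string, index, char):
--     q_positions = [i for i, c in enumerate(string) if c == "?"]
--     chars = list(string)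
--     for rank, pos in enumerate(q_positions):
--         chars[pos] = char if rank in index else "."
--     return "".join(chars)
-- ===== Notes on version B (the rewrite author's own statement) =====
-- stated objective: alternative
-- what changed: B first builds a table of the '?' positions, turns the string into a list of characters, overwrites each '?' position in place using the rank supplied by enumerate, and joins; A does one linear scan with a hand-maintained rank counter appending to a result string.
import Mathlib
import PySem

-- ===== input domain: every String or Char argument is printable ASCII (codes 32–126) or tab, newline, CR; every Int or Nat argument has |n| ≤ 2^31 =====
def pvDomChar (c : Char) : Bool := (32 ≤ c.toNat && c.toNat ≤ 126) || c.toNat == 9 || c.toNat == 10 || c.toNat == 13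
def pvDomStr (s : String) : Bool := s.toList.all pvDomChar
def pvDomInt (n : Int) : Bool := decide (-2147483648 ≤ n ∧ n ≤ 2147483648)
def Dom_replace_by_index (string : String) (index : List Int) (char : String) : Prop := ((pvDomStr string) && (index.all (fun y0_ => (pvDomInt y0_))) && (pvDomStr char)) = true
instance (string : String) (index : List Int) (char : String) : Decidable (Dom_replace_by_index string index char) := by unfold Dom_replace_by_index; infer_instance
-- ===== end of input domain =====

-- B replaces A's single scan with a hand-maintained rank counter by a position table
-- of the '?' indices plus an in-place overwrite pass driven by enumerate (objective: alternative).

-- ===== PORT A =====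
-- A's loop 'for i in range(len(string))' reads string[i] in order, so it walks the
-- character list front to back; result accumulator and the rank counter are the loop state.
def pvGoA (index : List Int) (char : List Char) : List Char → List Char → Int → List Char
  | [], result, _ => result
  | c :: rest, result, rank =>
    if c = '?' then
      pvGoA index char rest (result ++ (if rank ∈ index then char else ['.'])) (rank + 1)
    else
      pvGoA index char rest (result ++ [c]) rank

def replace_by_index (string : String) (index : List Int) (char : String) : String :=
  String.ofList (pvGoA index char.toList string.toList [] 0)

-- ===== PORT B =====
-- list(string) gives a list of one-character strings that may be overwritten by a longer
-- string, hence List (List Char); ''.join is flatten. All set positions come from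
-- enumerate(string) so they are in range and pySetD is exact.
def replace_by_index_alt (string : String) (index : List Int) (char : String) : String :=
  let cs := string.toList
  let q_positions : List Int :=
    (PySem.List.enumerate cs 0).filterMap (fun p => if p.2 = '?' then some p.1 else none)
  let chars0 : List (List Char) := cs.map (fun c => [c])
  let chars := (PySem.List.enumerate q_positions 0).foldl
    (fun acc rp => PySem.List.pySetD acc rp.2 (if rp.1 ∈ index then char.toList else ['.'])) chars0
  String.ofList chars.flatten

-- ===== PRECONDITION & SPEC =====
def Spec_replace_by_index (string : String) (index : List Int) (char : String) (out : String) : Prop := out = replace_by_index_alt string index char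
instance (string : String) (index : List Int) (char : String) (out : String) : Decidable (Spec_replace_by_index string index char out) := by unfold Spec_replace_by_index; infer_instance

-- ===== CLAIM (what is proved, stated in full; the proofs are below) =====
def Claim_equal_replace_by_index : Prop := ∀ (string : String) (index : List Int) (char : String), Dom_replace_by_index string index char → Spec_replace_by_index string index char (replace_by_index string index char)

-- ===== LEMMAS AND PROOFS =====

-- A's accumulator can be pulled out front.
theorem pvGoA_append (index : List Int) (char : List Char) :
    ∀ (cs acc : List Char) (rank : Int),
      pvGoA index char cs acc rank = acc ++ pvGoA index char cs [] rank := by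
  intro cs
  induction cs with
  | nil => intro acc rank; simp [pvGoA]
  | cons c rest ih =>
    intro acc rank
    by_cases hc : c = '?'
    · simp only [pvGoA, hc, if_true]
      rw [ih (acc ++ _), ih ([] ++ _)]
      simp
    · simp only [pvGoA, hc, if_false]
      rw [ih (acc ++ _), ih ([] ++ _)]
      simp

-- enumerate at a shifted start is enumerate with indices shifted.
theorem pvEnumerate_shift {α : Type} :
    ∀ (xs : List α) (s : Int),
      PySem.List.enumerate xs (s + 1) = (PySem.List.enumerate xs s).map (fun p => (p.1 + 1, p.2)) := by
  intro xs
  induction xs with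
  | nil => intro s; simp [PySem.List.enumerate_nil]
  | cons x rest ih =>
    intro s
    rw [PySem.List.enumerate_cons, PySem.List.enumerate_cons, ih (s + 1)]
    simp

-- the head-case shape of B's position table
theorem pvQpos_cons (c : Char) (rest : List Char) :
    (PySem.List.enumerate (c :: rest) 0).filterMap (fun p => if p.2 = '?' then some p.1 else none)
      = (if c = '?' then [(0 : Int)] else [])
        ++ ((PySem.List.enumerate rest 0).filterMap (fun p => if p.2 = '?' then some p.1 else none)).map (· + 1) := by
  rw [PySem.List.enumerate_cons, pvEnumerate_shift rest 0]
  by_cases hc : c = '?' <;>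
    simp [hc, List.filterMap_map, List.map_filterMap, Function.comp,
      apply_ite (Option.map (· + (1 : Int)))]

-- every position in B's table is nonnegative
theorem pvQpos_nonneg (cs : List Char) :
    ∀ p ∈ (PySem.List.enumerate cs 0).filterMap (fun p => if p.2 = '?' then some p.1 else none),
      0 ≤ p := by
  intro p hp
  obtain ⟨a, ha, hfa⟩ := List.mem_filterMap.mp hp
  by_cases h2 : a.2 = '?'
  · simp [h2] at hfa
    obtain ⟨k, hk, hak⟩ := (PySem.List.mem_enumerate_iff _ _ _).mp ha
    subst hak
    simp at hfa
    omega
  · simp [h2] at hfa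

-- setting at positions shifted by 1 passes an untouched head through the fold
theorem pvFold_shift (index : List Int) (char : List Char) :
    ∀ (q : List Int), (∀ p ∈ q, 0 ≤ p) → ∀ (k : Int) (x : List Char) (l : List (List Char)),
      (PySem.List.enumerate (q.map (· + 1)) k).foldl
          (fun acc rp => PySem.List.pySetD acc rp.2 (if rp.1 ∈ index then char else ['.'])) (x :: l)
        = x :: (PySem.List.enumerate q k).foldl
          (fun acc rp => PySem.List.pySetD acc rp.2 (if rp.1 ∈ index then char else ['.'])) l := by
  intro q
  induction q with
  | nil => intro _ k x l; simp [PySem.List.enumerate_nil]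
  | cons p qs ih =>
    intro hq k x l
    have hp : 0 ≤ p := hq p (by simp)
    rw [List.map_cons, PySem.List.enumerate_cons, PySem.List.enumerate_cons]
    simp only [List.foldl_cons]
    have hset : PySem.List.pySetD (x :: l) (p + 1) (if k ∈ index then char else ['.'])
        = x :: PySem.List.pySetD l p (if k ∈ index then char else ['.']) := by
      rw [PySem.List.pySetD_of_nonneg _ _ (by omega), PySem.List.pySetD_of_nonneg _ _ hp]
      have ht : (p + 1).toNat = p.toNat + 1 := by omega
      rw [ht]
      simp
    rw [hset, ih (fun r hr => hq r (by simp [hr])) (k + 1)]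

-- main invariant: B's overwrite fold, started at rank k, flattens to A's scan at rank k
theorem pvMain (index : List Int) (char : List Char) :
    ∀ (cs : List Char) (k : Int),
      ((PySem.List.enumerate
            ((PySem.List.enumerate cs 0).filterMap (fun p => if p.2 = '?' then some p.1 else none)) k).foldl
          (fun acc rp => PySem.List.pySetD acc rp.2 (if rp.1 ∈ index then char else ['.']))
          (cs.map (fun c => [c]))).flatten
        = pvGoA index char cs [] k := by
  intro cs
  induction cs with
  | nil => intro k; simp [PySem.List.enumerate_nil, pvGoA]
  | cons c rest ih =>
    intro k
    rw [pvQpos_cons]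
    by_cases hc : c = '?'
    · simp only [hc, if_true, List.singleton_append, PySem.List.enumerate_cons,
        List.map_cons, List.foldl_cons]
      have hset : PySem.List.pySetD (['?'] :: rest.map (fun c => [c])) (0 : Int)
            (if k ∈ index then char else ['.'])
          = (if k ∈ index then char else ['.']) :: rest.map (fun c => [c]) := by
        rw [PySem.List.pySetD_of_nonneg _ _ (by omega)]
        simp
      rw [hset, pvFold_shift index char _ (pvQpos_nonneg rest) (k + 1)]
      simp only [List.flatten_cons, ih (k + 1)]
      simp only [pvGoA, if_true]
      exact (pvGoA_append index char rest _ _).symm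
    · simp only [hc, if_false, List.nil_append, List.map_cons]
      rw [pvFold_shift index char _ (pvQpos_nonneg rest) k]
      simp only [List.flatten_cons, ih k]
      simp only [pvGoA, hc, if_false]
      exact (pvGoA_append index char rest _ _).symm

-- ===== VERDICT (by name: the statement is the Claim_ definition above) =====
theorem replace_by_index_spec : Claim_equal_replace_by_index := by
  intro string index char _
  unfold Spec_replace_by_index replace_by_index replace_by_index_alt
  exact congrArg String.ofList (pvMain index char.toList string.toList 0).symm
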